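-- pv_equiv track=rewrite | github.com/SorenHJohansen/SattLint | src/sattlint/validation.py | _suggest_datatype_name
-- ===== SOURCE A (Python) =====
-- from collections.abc import Sequence as AbcSequence
--
-- def _bounded_levenshtein(left: str, right: str, *, max_distance: int = 2) -> int | None:
--     left_cf = left.casefold()
--     right_cf = right.casefold()
--
--     if left_cf == right_cf:
--         return 0
--     if abs(len(left_cf) - len(right_cf)) > max_distance:
--         return None
--
--     previous = list(range(len(right_cf) + 1))
--     for row_index, left_char in enumerate(left_cf, start=1):
--         current = [row_index]
--         row_min = current[0]
--         for col_index, right_char in enumerate(right_cf, start=1):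
--             cost = 0 if left_char == right_char else 1
--             current_value = min(
--                 previous[col_index] + 1,
--                 current[col_index - 1] + 1,
--                 previous[col_index - 1] + cost,
--             )
--             current.append(current_value)
--             row_min = min(row_min, current_value)
--         if row_min > max_distance:
--             return None
--         previous = current
--
--     distance = previous[-1]
--     return distance if distance <= max_distance else None
--
-- def _suggest_datatype_name(name: str, known_datatypes: AbcSequence[str]) -> str | None:
--     best_match: str | None = None
--     best_distance: int | None = None
--     name_cf = name.casefold()
--     for candidate in known_datatypes:
--         distance = _bounded_levenshtein(name, candidate, max_distance=2)
--         if distance is None: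
--             continue
--         # Skip candidates that are a strict prefix of the unknown name.
--         # Such names are extensions of the candidate (e.g. 'Timer' extends 'time'),
--         # not misspellings of it.
--         candidate_cf = candidate.casefold()
--         if name_cf.startswith(candidate_cf):
--             continue
--         if best_distance is None or distance < best_distance:
--             best_match = candidate
--             best_distance = distance
--     return best_match
-- ===== SOURCE B (Python) =====
-- def _lev_band(a, b, i, j, k):
--     # exact Levenshtein of a[:i] vs b[:j] if it is <= k, else None:
--     # strip the common suffix, then branch on the three edits with budget k-1.
--     while i > 0 and j > 0 and a[i - 1] == b[j - 1]:
--         i -= 1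
--         j -= 1
--     if i == 0:
--         return j if j <= k else None
--     if j == 0:
--         return i if i <= k else None
--     if k == 0:
--         return None
--     best = None
--     for di, dj in ((i - 1, j - 1), (i, j - 1), (i - 1, j)):
--         sub = _lev_band(a, b, di, dj, k - 1)
--         if sub is not None and (best is None or sub < best):
--             best = sub
--     return None if best is None else best + 1
--
--
-- def _suggest_datatype_name(name, known_datatypes):
--     name_cf = name.casefold()
--     best = None  # (distance, candidate)
--     for candidate in known_datatypes:
--         candidate_cf = candidate.casefold()
--         # Names extending the candidate are not misspellings of it.
--         if name_cf.startswith(candidate_cf):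
--             continue
--         d = _lev_band(name_cf, candidate_cf, len(name_cf), len(candidate_cf), 2)
--         if d is not None and (best is None or d < best[0]):
--             best = (d, candidate)
--     return None if best is None else best[1]
-- ===== Notes on version B (the rewrite author's own statement) =====
-- stated objective: faster
-- what changed: Replaces the full row-by-row Levenshtein DP (whole width-(m+1) rows with an early row-minimum exit) by a budgeted branching recursion that strips the common suffix and tries the three edits with budget k-1, so only O(3^k) short suffix scans are done per candidate instead of full DP rows.
import Mathlib
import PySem

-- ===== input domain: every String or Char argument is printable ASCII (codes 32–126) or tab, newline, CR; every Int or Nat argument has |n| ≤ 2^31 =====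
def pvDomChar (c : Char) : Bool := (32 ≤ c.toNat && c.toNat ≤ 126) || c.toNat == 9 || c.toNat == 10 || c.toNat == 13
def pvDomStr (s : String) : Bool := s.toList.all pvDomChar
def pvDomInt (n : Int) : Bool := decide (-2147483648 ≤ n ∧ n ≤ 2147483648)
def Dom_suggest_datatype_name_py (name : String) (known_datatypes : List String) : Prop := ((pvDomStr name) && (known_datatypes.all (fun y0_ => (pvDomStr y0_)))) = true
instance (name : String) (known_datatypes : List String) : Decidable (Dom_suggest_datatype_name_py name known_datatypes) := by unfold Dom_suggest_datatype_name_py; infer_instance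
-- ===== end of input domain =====

-- B replaces A's full row-by-row Levenshtein DP by a budgeted branching recursion with
-- common-suffix stripping (objective: faster).  str.casefold() is ported as PySem.Str.lower,
-- exact on the ASCII domain above.

-- ===== PORT A =====
-- inner loop of _bounded_levenshtein: 'for col_index, right_char in enumerate(right_cf, 1)',
-- carrying (current, row_min); ci is col_index, the remaining chars of right_cf are consumed.
def pvColLoop (prev : List Int) (lc : Char) : List Char → Int → List Int → Int → List Int × Int
  | [], _, cur, rmin => (cur, rmin)
  | rc :: rest, ci, cur, rmin =>
      let cost : Int := if lc = rc then 0 else 1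
      let cv := min (min (PySem.List.pyGetD prev ci 0 + 1) (PySem.List.pyGetD cur (ci - 1) 0 + 1))
                    (PySem.List.pyGetD prev (ci - 1) 0 + cost)
      pvColLoop prev lc rest (ci + 1) (cur ++ [cv]) (min rmin cv)

-- outer loop of _bounded_levenshtein: 'for row_index, left_char in enumerate(left_cf, 1)';
-- none = the early 'return None' when row_min > max_distance.
def pvRowsLoop (rcf : List Char) (md : Int) : List Char → Int → List Int → Option (List Int)
  | [], _, prev => some prev
  | lc :: rest, ri, prev =>
      let p := pvColLoop prev lc rcf 1 [ri] ri
      if p.2 > md then none else pvRowsLoop rcf md rest (ri + 1) p.1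

-- _bounded_levenshtein(left, right, max_distance=md)
def pvBoundedLev (left right : String) (md : Int) : Option Int :=
  let left_cf := PySem.Str.lower left
  let right_cf := PySem.Str.lower right
  if left_cf = right_cf then some 0
  else if |PySem.Str.len left_cf - PySem.Str.len right_cf| > md then none
  else
    match pvRowsLoop right_cf.toList md left_cf.toList 1
        (PySem.List.pyRange 0 (PySem.Str.len right_cf + 1) 1) with
    | none => none
    | some prev =>
        if PySem.List.pyGetD prev (-1) 0 ≤ md then some (PySem.List.pyGetD prev (-1) 0) else none

-- loop of _suggest_datatype_name, state (best_match, best_distance)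
def pvSuggestLoopA (name name_cf : String) : List String → Option String → Option Int → Option String
  | [], bm, _ => bm
  | c :: rest, bm, bd =>
      match pvBoundedLev name c 2 with
      | none => pvSuggestLoopA name name_cf rest bm bd
      | some d =>
          let candidate_cf := PySem.Str.lower c
          if PySem.Str.startswith name_cf candidate_cf then pvSuggestLoopA name name_cf rest bm bd
          else
            match bd with
            | none => pvSuggestLoopA name name_cf rest (some c) (some d)
            | some b => if d < b then pvSuggestLoopA name name_cf rest (some c) (some d)
                        else pvSuggestLoopA name name_cf rest bm bd

def suggest_datatype_name_py (name : String) (known_datatypes : List String) : Option String :=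
  pvSuggestLoopA name (PySem.Str.lower name) known_datatypes none none

-- ===== PORT B =====
-- the 'if sub is not None and (best is None or sub < best): best = sub' update of _lev_band
def pvUpd (best sub : Option Int) : Option Int :=
  match sub with
  | none => best
  | some v => match best with
              | none => some v
              | some bv => if v < bv then some v else some bv

-- _lev_band(a, b, i, j, k): strip the common suffix, then branch on the three edits
def pvLevBand (a b : List Char) (i j k : Nat) : Option Int :=
  if h : 0 < i ∧ 0 < j ∧ a.getD (i - 1) ' ' = b.getD (j - 1) ' ' then
    pvLevBand a b (i - 1) (j - 1) k
  else if i = 0 then (if (j : Int) ≤ (k : Int) then some (j : Int) else none)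
  else if j = 0 then (if (i : Int) ≤ (k : Int) then some (i : Int) else none)
  else if k = 0 then none
  else
    let s1 := pvLevBand a b (i - 1) (j - 1) (k - 1)
    let s2 := pvLevBand a b i (j - 1) (k - 1)
    let s3 := pvLevBand a b (i - 1) j (k - 1)
    Option.map (· + 1) (pvUpd (pvUpd (pvUpd none s1) s2) s3)
termination_by i + j
decreasing_by all_goals omega

-- loop of B's _suggest_datatype_name, state best : Option (distance, candidate)
def pvSuggestLoopB (name_cf : String) : List String → Option (Int × String) → Option (Int × String)
  | [], best => best
  | c :: rest, best =>
      let candidate_cf := PySem.Str.lower c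
      if PySem.Str.startswith name_cf candidate_cf then pvSuggestLoopB name_cf rest best
      else
        match pvLevBand name_cf.toList candidate_cf.toList name_cf.toList.length candidate_cf.toList.length 2 with
        | none => pvSuggestLoopB name_cf rest best
        | some d =>
            match best with
            | none => pvSuggestLoopB name_cf rest (some (d, c))
            | some p => if d < p.1 then pvSuggestLoopB name_cf rest (some (d, c))
                        else pvSuggestLoopB name_cf rest (some p)

def suggest_datatype_name_py_alt (name : String) (known_datatypes : List String) : Option String :=
  let name_cf := PySem.Str.lower name
  match pvSuggestLoopB name_cf known_datatypes none with
  | none => none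
  | some p => some p.2

-- ===== PRECONDITION & SPEC =====
def Spec_suggest_datatype_name_py (name : String) (known_datatypes : List String) (out : Option String) : Prop := out = suggest_datatype_name_py_alt name known_datatypes
instance (name : String) (known_datatypes : List String) (out : Option String) : Decidable (Spec_suggest_datatype_name_py name known_datatypes out) := by unfold Spec_suggest_datatype_name_py; infer_instance

-- ===== CLAIM (what is proved, stated in full; the proofs are below) =====
def Claim_equal_suggest_datatype_name_py : Prop := ∀ (name : String) (known_datatypes : List String), Dom_suggest_datatype_name_py name known_datatypes → Spec_suggest_datatype_name_py name known_datatypes (suggest_datatype_name_py name known_datatypes)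

-- ===== LEMMAS AND PROOFS =====

-- the prefix edit-distance table both programs compute: pvDm a b i j = lev(a[:i], b[:j])
def pvDm (a b : List Char) : Nat → Nat → Nat
  | 0, j => j
  | i + 1, 0 => i + 1
  | i + 1, j + 1 =>
      min (min (pvDm a b i (j + 1) + 1) (pvDm a b (i + 1) j + 1))
          (pvDm a b i j + (if a.getD i ' ' = b.getD j ' ' then 0 else 1))
termination_by i j => (i, j)

theorem pvDm_zero_left (a b : List Char) (j : Nat) : pvDm a b 0 j = j := by
  cases j <;> simp [pvDm]

theorem pvDm_left_zero (a b : List Char) (i : Nat) : pvDm a b i 0 = i := by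
  cases i <;> simp [pvDm]

theorem pvDm_succ_succ (a b : List Char) (i j : Nat) :
    pvDm a b (i + 1) (j + 1) =
      min (min (pvDm a b i (j + 1) + 1) (pvDm a b (i + 1) j + 1))
          (pvDm a b i j + (if a.getD i ' ' = b.getD j ' ' then 0 else 1)) := by
  rw [pvDm]

-- |i - j| ≤ pvDm i j
theorem pvDm_diff_le (a b : List Char) : ∀ i j, i ≤ pvDm a b i j + j ∧ j ≤ pvDm a b i j + i := by
  intro i
  induction i with
  | zero => intro j; rw [pvDm_zero_left]; omega
  | succ i ih =>
    intro j
    induction j with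
    | zero => rw [pvDm_left_zero]; omega
    | succ j ihj =>
      have h1 := ih (j + 1)
      have h3 := ih j
      rw [pvDm_succ_succ]
      split_ifs <;> omega

-- forward adjacency (a deletion/insertion step costs at most 1)
theorem pvDm_succ_left_le (a b : List Char) (i j : Nat) :
    pvDm a b (i + 1) j ≤ pvDm a b i j + 1 := by
  cases j with
  | zero => rw [pvDm_left_zero, pvDm_left_zero]
  | succ j => rw [pvDm_succ_succ]; omega

theorem pvDm_succ_right_le (a b : List Char) (i j : Nat) :
    pvDm a b i (j + 1) ≤ pvDm a b i j + 1 := by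
  cases i with
  | zero => rw [pvDm_zero_left, pvDm_zero_left]
  | succ i => rw [pvDm_succ_succ]; omega

-- reverse adjacency: pvDm is 1-Lipschitz in each index
theorem pvDm_le_succ_right (a b : List Char) : ∀ i j, pvDm a b i j ≤ pvDm a b i (j + 1) + 1 := by
  intro i
  induction i with
  | zero => intro j; rw [pvDm_zero_left, pvDm_zero_left]; omega
  | succ i ih =>
    intro j
    cases j with
    | zero =>
      rw [pvDm_left_zero]
      have := (pvDm_diff_le a b (i + 1) 1).1
      omega
    | succ j =>
      have hA := pvDm_succ_left_le a b i (j + 1)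
      have hB := ih (j + 1)
      rw [pvDm_succ_succ a b i (j + 1)]
      split_ifs <;> omega

theorem pvDm_le_succ_left (a b : List Char) : ∀ j i, pvDm a b i j ≤ pvDm a b (i + 1) j + 1 := by
  intro j
  induction j with
  | zero => intro i; rw [pvDm_left_zero, pvDm_left_zero]; omega
  | succ j ih =>
    intro i
    cases i with
    | zero =>
      rw [pvDm_zero_left]
      have := (pvDm_diff_le a b 1 (j + 1)).2
      omega
    | succ i =>
      have hA := pvDm_succ_right_le a b (i + 1) j
      have hB := ih (i + 1)
      rw [pvDm_succ_succ a b (i + 1) j]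
      split_ifs <;> omega

-- equal chars: the diagonal move is optimal
theorem pvDm_diag (a b : List Char) (i j : Nat) (h : a.getD i ' ' = b.getD j ' ') :
    pvDm a b (i + 1) (j + 1) = pvDm a b i j := by
  have h1 := pvDm_le_succ_right a b i j
  have h2 := pvDm_le_succ_left a b j i
  rw [pvDm_succ_succ, if_pos h]
  omega

theorem pvDm_pos (a b : List Char) (i j : Nat) (h : a.getD i ' ' ≠ b.getD j ' ') :
    1 ≤ pvDm a b (i + 1) (j + 1) := by
  rw [pvDm_succ_succ, if_neg h]
  omega

theorem pvDm_self (a : List Char) : ∀ i, pvDm a a i i = 0 := by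
  intro i
  induction i with
  | zero => rw [pvDm_zero_left]
  | succ i ih => rw [pvDm_diag a a i i rfl, ih]

-- once a whole row exceeds md, every later entry (in columns ≤ m) does
theorem pvDm_row_lb (a b : List Char) (m : Nat) (md : Int) (i : Nat)
    (h : ∀ j, j ≤ m → md < (pvDm a b i j : Int)) :
    ∀ i' j, i ≤ i' → j ≤ m → md < (pvDm a b i' j : Int) := by
  intro i'
  induction i' with
  | zero =>
    intro j hi hj
    have : i = 0 := Nat.le_zero.mp hi
    subst this
    exact h j hj
  | succ n ihn =>
    intro j hi hj
    rcases Nat.lt_or_ge i (n + 1) with hlt | hge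
    · have hrow : ∀ j, j ≤ m → md < (pvDm a b n j : Int) := fun j hj => ihn j (by omega) hj
      clear hi ihn h
      induction j with
      | zero =>
        have := hrow 0 (by omega)
        rw [pvDm_left_zero] at this ⊢
        push_cast at this ⊢
        omega
      | succ j ihj =>
        have hj' : j ≤ m := by omega
        have e1 := hrow (j + 1) hj
        have e2 := hrow j hj'
        have e3 := ihj hj'
        rw [pvDm_succ_succ]
        split_ifs <;> (push_cast at * ; omega)
    · have : i = n + 1 := by omega
      subst this
      exact h j hj

theorem pvUpd_caps (d1 d2 d3 k M : Nat) (hM1 : M ≤ d1 + 1) (hM2 : M ≤ d2 + 1)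
    (hM3 : M ≤ d3 + 1) (hM4 : M = d1 + 1 ∨ M = d2 + 1 ∨ M = d3 + 1) :
    Option.map (· + 1) (pvUpd (pvUpd (pvUpd none (if d1 ≤ k then some ((d1 : Nat) : Int) else none))
        (if d2 ≤ k then some ((d2 : Nat) : Int) else none)) (if d3 ≤ k then some ((d3 : Nat) : Int) else none))
    = if M ≤ k + 1 then some ((M : Nat) : Int) else none := by
  simp only [pvUpd]
  split_ifs <;>
    simp only [Option.map_some, Option.map_none, Option.some.injEq] <;>
    (try (split_ifs <;> simp only [Option.map_some, Option.some.injEq])) <;>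
    (try (split_ifs <;> simp only [Option.map_some, Option.some.injEq])) <;>
    (rcases hM4 with h4 | h4 | h4 <;> omega)

theorem pvLevBand_spec (a b : List Char) : ∀ N i j k, i + j ≤ N →
    pvLevBand a b i j k = if pvDm a b i j ≤ k then some ((pvDm a b i j : Nat) : Int) else none := by
  intro N
  induction N with
  | zero =>
    intro i j k h
    have hi : i = 0 := by omega
    have hj : j = 0 := by omega
    subst hi; subst hj
    rw [pvLevBand]
    simp [pvDm_zero_left]
  | succ N ih =>
    intro i j k hij
    rw [pvLevBand]
    by_cases h : 0 < i ∧ 0 < j ∧ a.getD (i - 1) ' ' = b.getD (j - 1) ' '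
    · rw [dif_pos h]
      obtain ⟨i', rfl⟩ : ∃ i', i = i' + 1 := ⟨i - 1, by omega⟩
      obtain ⟨j', rfl⟩ : ∃ j', j = j' + 1 := ⟨j - 1, by omega⟩
      simp only [Nat.add_sub_cancel] at h ⊢
      rw [ih i' j' k (by omega), pvDm_diag a b i' j' h.2.2]
    · rw [dif_neg h]
      by_cases hi : i = 0
      · subst hi
        rw [if_pos rfl]
        rw [pvDm_zero_left]
        split_ifs <;> first | rfl | (exfalso; omega)
      · rw [if_neg hi]
        by_cases hj : j = 0
        · subst hj
          rw [if_pos rfl, pvDm_left_zero]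
          split_ifs <;> first | rfl | (exfalso; omega)
        · rw [if_neg hj]
          obtain ⟨i', rfl⟩ : ∃ i', i = i' + 1 := ⟨i - 1, by omega⟩
          obtain ⟨j', rfl⟩ : ∃ j', j = j' + 1 := ⟨j - 1, by omega⟩
          have hne : a.getD i' ' ' ≠ b.getD j' ' ' := by
            intro he
            exact h ⟨by omega, by omega, by simpa using he⟩
          by_cases hk : k = 0
          · subst hk
            rw [if_pos rfl]
            have := pvDm_pos a b i' j' hne
            rw [if_neg (by omega)]
          · rw [if_neg hk]
            obtain ⟨k', rfl⟩ : ∃ k', k = k' + 1 := ⟨k - 1, by omega⟩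
            simp only [Nat.add_sub_cancel]
            rw [ih i' j' k' (by omega), ih (i' + 1) j' k' (by omega), ih i' (j' + 1) k' (by omega)]
            have he := pvDm_succ_succ a b i' j'
            rw [if_neg hne] at he
            exact pvUpd_caps (pvDm a b i' j') (pvDm a b (i' + 1) j') (pvDm a b i' (j' + 1)) k'
              (pvDm a b (i' + 1) (j' + 1)) (by omega) (by omega) (by omega) (by omega)

-- three small facts about List.drop used to walk the loops
theorem pvDrop_getD (R : List Char) (j : Nat) (rc : Char) (rest : List Char)
    (h : R.drop j = rc :: rest) : R.getD j ' ' = rc := by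
  have h1 : R[j]? = some rc := by
    have := List.getElem?_drop (xs := R) (i := j) (j := 0)
    rw [h] at this; simpa using this.symm
  simp [List.getD_eq_getElem?_getD, h1]

theorem pvDrop_succ (R : List Char) (j : Nat) (rc : Char) (rest : List Char)
    (h : R.drop j = rc :: rest) : R.drop (j + 1) = rest := by
  have := List.drop_drop (i := 1) (j := j) (l := R)
  rw [h] at this
  rw [← this]; rfl

theorem pvDrop_lt (R : List Char) (j : Nat) (rc : Char) (rest : List Char)
    (h : R.drop j = rc :: rest) : j < R.length := by
  by_contra hc
  rw [List.drop_eq_nil_of_le (by omega)] at h; simp at h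

theorem pvGetD_map_range (n : Nat) (f : Nat → Int) (k : Nat) (h : k < n) :
    ((List.range n).map f).getD k 0 = f k := by
  rw [PySem.List.getD_map_range]; simp [h]

-- the DP row i of A, as a function of pvDm
def pvRowL (L R : List Char) (i : Nat) : List Int :=
  (List.range (R.length + 1)).map (fun t => ((pvDm L R i t : Nat) : Int))

theorem pvColLoop_spec (L R : List Char) (i : Nat) :
    ∀ (suf : List Char) (j : Nat) (cur : List Int) (rmin : Int),
      suf = R.drop j → j ≤ R.length →
      cur = (List.range (j + 1)).map (fun t => ((pvDm L R (i + 1) t : Nat) : Int)) →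
      (∀ x ∈ cur, rmin ≤ x) →
      ∃ r, pvColLoop (pvRowL L R i) (L.getD i ' ') suf ((j : Int) + 1) cur rmin
            = (pvRowL L R (i + 1), r) ∧ ∀ x ∈ pvRowL L R (i + 1), r ≤ x := by
  intro suf
  induction suf with
  | nil =>
    intro j cur rmin h1 hj h2 h3
    have hjm : j = R.length := by
      have := List.drop_eq_nil_iff.mp h1.symm
      omega
    subst hjm
    refine ⟨rmin, by simp [pvColLoop, h2, pvRowL], ?_⟩
    intro x hx
    apply h3
    rw [h2]
    simpa [pvRowL] using hx
  | cons rc rest ih =>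
    intro j cur rmin h1 hj h2 h3
    have hjlt : j < R.length := pvDrop_lt R j rc rest h1.symm
    have hrc : R.getD j ' ' = rc := pvDrop_getD R j rc rest h1.symm
    have hrest : rest = R.drop (j + 1) := (pvDrop_succ R j rc rest h1.symm).symm
    simp only [pvColLoop]
    have e1 : PySem.List.pyGetD (pvRowL L R i) ((j : Int) + 1) 0
        = ((pvDm L R i (j + 1) : Nat) : Int) := by
      have hc : ((j : Int) + 1) = ((j + 1 : Nat) : Int) := by push_cast; ring
      rw [pvRowL, hc, PySem.List.pyGetD_natCast, pvGetD_map_range _ _ _ (by omega)]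
    have e2 : PySem.List.pyGetD cur ((j : Int) + 1 - 1) 0
        = ((pvDm L R (i + 1) j : Nat) : Int) := by
      have hc : ((j : Int) + 1 - 1) = ((j : Nat) : Int) := by omega
      rw [h2, hc, PySem.List.pyGetD_natCast, pvGetD_map_range _ _ _ (by omega)]
    have e3 : PySem.List.pyGetD (pvRowL L R i) ((j : Int) + 1 - 1) 0
        = ((pvDm L R i j : Nat) : Int) := by
      have hc : ((j : Int) + 1 - 1) = ((j : Nat) : Int) := by omega
      rw [pvRowL, hc, PySem.List.pyGetD_natCast, pvGetD_map_range _ _ _ (by omega)]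
    rw [e1, e2, e3, ← hrc]
    have hcv : min (min (((pvDm L R i (j + 1) : Nat) : Int) + 1) (((pvDm L R (i + 1) j : Nat) : Int) + 1))
          (((pvDm L R i j : Nat) : Int) + (if L.getD i ' ' = R.getD j ' ' then (0 : Int) else 1))
        = ((pvDm L R (i + 1) (j + 1) : Nat) : Int) := by
      rw [pvDm_succ_succ]
      split_ifs <;> (push_cast; omega)
    rw [hcv]
    have hci : ((j : Int) + 1 + 1) = (((j + 1 : Nat) : Int) + 1) := by push_cast; ring
    rw [hci]
    apply ih (j + 1) _ _ hrest (by omega)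
    · rw [List.range_succ, List.map_append, h2]; rfl
    · intro x hx
      rcases List.mem_append.mp hx with hx | hx
      · exact le_trans (min_le_left _ _) (h3 x hx)
      · simp only [List.mem_singleton] at hx
        subst hx
        exact min_le_right _ _

theorem pvRowsLoop_spec (L R : List Char) (md : Int) :
    ∀ (suf : List Char) (i : Nat), suf = L.drop i → i ≤ L.length →
      pvRowsLoop R md suf ((i : Int) + 1) (pvRowL L R i) = some (pvRowL L R L.length)
      ∨ (pvRowsLoop R md suf ((i : Int) + 1) (pvRowL L R i) = none
          ∧ md < ((pvDm L R L.length R.length : Nat) : Int)) := by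
  intro suf
  induction suf with
  | nil =>
    intro i h1 hi
    have : i = L.length := by
      have := List.drop_eq_nil_iff.mp h1.symm
      omega
    subst this
    left
    simp [pvRowsLoop]
  | cons lc rest ih =>
    intro i h1 hi
    have hilt : i < L.length := pvDrop_lt L i lc rest h1.symm
    have hlc : L.getD i ' ' = lc := pvDrop_getD L i lc rest h1.symm
    have hrest : rest = L.drop (i + 1) := (pvDrop_succ L i lc rest h1.symm).symm
    obtain ⟨r, hp, hr⟩ := pvColLoop_spec L R i R 0 [(i : Int) + 1] ((i : Int) + 1)
      (by simp) (by omega)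
      (by simp [pvDm_left_zero])
      (by intro x hx; simp at hx; omega)
    rw [show ((0 : Nat) : Int) + 1 = 1 from by norm_num] at hp
    simp only [pvRowsLoop, ← hlc]
    rw [hp]
    by_cases hgt : r > md
    · right
      rw [if_pos hgt]
      refine ⟨rfl, ?_⟩
      have hrow : ∀ t, t ≤ R.length → md < ((pvDm L R (i + 1) t : Nat) : Int) := by
        intro t ht
        have hmem : ((pvDm L R (i + 1) t : Nat) : Int) ∈ pvRowL L R (i + 1) := by
          rw [pvRowL]
          exact List.mem_map.mpr ⟨t, List.mem_range.mpr (by omega), rfl⟩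
        have := hr _ hmem
        omega
      exact pvDm_row_lb L R R.length md (i + 1) hrow L.length R.length (by omega) (by omega)
    · rw [if_neg hgt]
      have hcast2 : ((i : Int) + 1) + 1 = ((i + 1 : Nat) : Int) + 1 := by push_cast; ring
      rw [hcast2]
      exact ih (i + 1) hrest (by omega)

theorem pvBoundedLev_spec (l r : String) :
    pvBoundedLev l r 2 =
      (if pvDm (PySem.Str.lower l).toList (PySem.Str.lower r).toList
            (PySem.Str.lower l).toList.length (PySem.Str.lower r).toList.length ≤ 2 then
        some ((pvDm (PySem.Str.lower l).toList (PySem.Str.lower r).toList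
            (PySem.Str.lower l).toList.length (PySem.Str.lower r).toList.length : Nat) : Int)
      else none) := by
  rw [pvBoundedLev]
  by_cases heq : PySem.Str.lower l = PySem.Str.lower r
  · rw [if_pos heq, heq, pvDm_self]
    norm_num
  · rw [if_neg heq]
    by_cases hlen : |PySem.Str.len (PySem.Str.lower l) - PySem.Str.len (PySem.Str.lower r)| > 2
    · rw [if_pos hlen]
      have hd := pvDm_diff_le (PySem.Str.lower l).toList (PySem.Str.lower r).toList
        (PySem.Str.lower l).toList.length (PySem.Str.lower r).toList.length
      simp only [PySem.Str.len_eq] at hlen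
      have hne : ¬ (pvDm (PySem.Str.lower l).toList (PySem.Str.lower r).toList
          (PySem.Str.lower l).toList.length (PySem.Str.lower r).toList.length ≤ 2) := by
        rcases abs_cases (((PySem.Str.lower l).toList.length : Int)
            - ((PySem.Str.lower r).toList.length : Int)) with ⟨he, _⟩ | ⟨he, _⟩ <;> omega
      rw [if_neg hne]
    · rw [if_neg hlen]
      have hprev : PySem.List.pyRange 0 (PySem.Str.len (PySem.Str.lower r) + 1) 1
          = pvRowL (PySem.Str.lower l).toList (PySem.Str.lower r).toList 0 := by
        simp only [PySem.Str.len_eq]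
        have h1 : ((PySem.Str.lower r).toList.length : Int) + 1
            = (((PySem.Str.lower r).toList.length + 1 : Nat) : Int) := by push_cast; ring
        rw [h1, PySem.List.pyRange_zero_nat, pvRowL]
        apply List.map_congr_left
        intro t ht
        rw [pvDm_zero_left]
      rw [hprev]
      have hs := pvRowsLoop_spec (PySem.Str.lower l).toList (PySem.Str.lower r).toList 2
        (PySem.Str.lower l).toList 0 rfl (by omega)
      rw [show ((0 : Nat) : Int) + 1 = 1 from by norm_num] at hs
      rcases hs with hsome | ⟨hnone, hgt⟩
      · rw [hsome]
        dsimp only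
        have hlast : PySem.List.pyGetD
            (pvRowL (PySem.Str.lower l).toList (PySem.Str.lower r).toList (PySem.Str.lower l).toList.length) (-1) 0
            = ((pvDm (PySem.Str.lower l).toList (PySem.Str.lower r).toList
                (PySem.Str.lower l).toList.length (PySem.Str.lower r).toList.length : Nat) : Int) := by
          rw [pvRowL, List.range_succ, List.map_append]
          exact PySem.List.pyGetD_neg_one_append_singleton _ _ _
        rw [hlast]
        split_ifs <;> first | rfl | (exfalso; omega)
      · rw [hnone]
        dsimp only
        rw [if_neg (by omega)]

-- A's per-candidate distance equals B's
theorem pvDist_eq (name c : String) :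
    pvBoundedLev name c 2 = pvLevBand (PySem.Str.lower name).toList (PySem.Str.lower c).toList
      (PySem.Str.lower name).toList.length (PySem.Str.lower c).toList.length 2 := by
  rw [pvBoundedLev_spec name c,
    pvLevBand_spec (PySem.Str.lower name).toList (PySem.Str.lower c).toList
      ((PySem.Str.lower name).toList.length + (PySem.Str.lower c).toList.length)
      (PySem.Str.lower name).toList.length (PySem.Str.lower c).toList.length 2 le_rfl]

-- the two selection loops keep related states: A's (best_match, best_distance) is B's best pair
theorem pvLoops_eq (name : String) :
    ∀ (cs : List String) (best : Option (Int × String)),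
      pvSuggestLoopA name (PySem.Str.lower name) cs (Option.map Prod.snd best) (Option.map Prod.fst best)
        = Option.map Prod.snd (pvSuggestLoopB (PySem.Str.lower name) cs best) := by
  intro cs
  induction cs with
  | nil => intro best; rfl
  | cons c rest ih =>
    intro best
    simp only [pvSuggestLoopA, pvSuggestLoopB, pvDist_eq name c]
    cases h : pvLevBand (PySem.Str.lower name).toList (PySem.Str.lower c).toList
        (PySem.Str.lower name).toList.length (PySem.Str.lower c).toList.length 2 with
    | none =>
      by_cases hs : PySem.Str.startswith (PySem.Str.lower name) (PySem.Str.lower c) = true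
      · simp only [hs, if_true]
        exact ih best
      · simp only [hs, if_false, Bool.false_eq_true]
        exact ih best
    | some d =>
      by_cases hs : PySem.Str.startswith (PySem.Str.lower name) (PySem.Str.lower c) = true
      · simp only [hs, if_true]
        exact ih best
      · simp only [hs, if_false, Bool.false_eq_true]
        cases best with
        | none => exact ih (some (d, c))
        | some p =>
          by_cases hd : d < p.1
          · simp only [Option.map_some, hd, if_true]
            exact ih (some (d, c))
          · simp only [Option.map_some, hd, if_false]
            exact ih (some p)

-- ===== VERDICT (by name: the statement is the Claim_ definition above) =====
theorem suggest_datatype_name_py_spec : Claim_equal_suggest_datatype_name_py := by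
  unfold Claim_equal_suggest_datatype_name_py
  intro name known _
  unfold Spec_suggest_datatype_name_py
  simp only [suggest_datatype_name_py, suggest_datatype_name_py_alt]
  have h := pvLoops_eq name known none
  cases hB : pvSuggestLoopB (PySem.Str.lower name) known none with
  | none => rw [hB] at h; simpa using h
  | some p => rw [hB] at h; simpa using h
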